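-- pv_equiv track=rewrite | github.com/regentribes/genesis-zero-bot | rewritenotes.py | remove_frontmatter
-- ===== SOURCE A (Python) =====
-- def remove_frontmatter(content):
--     """Remove YAML frontmatter block (lines between --- and --- at top)"""
--     lines = content.split('\n')
--
--     if lines and lines[0].strip() == '---':
--         new_lines = []
--         in_frontmatter = True
--         for i, line in enumerate(lines):
--             if i == 0:
--                 continue  # skip opening ---
--             if in_frontmatter:
--                 if line.strip() == '---':
--                     in_frontmatter = False
--                     continue  # skip blank lines after closing ---
--             else:
--                 # Skip leading blank lines after frontmatter
--                 if new_lines or line.strip() != '':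
--                     new_lines.append(line)
--         return '\n'.join(new_lines).lstrip('\n')
--
--     return content
-- ===== SOURCE B (Python) =====
-- def remove_frontmatter(content):
--     """Remove YAML frontmatter block (lines between --- and --- at top)"""
--     lines = content.split('\n')
--     if lines[0].strip() != '---':
--         return content
--     close = None
--     for i in range(1, len(lines)):
--         if lines[i].strip() == '---':
--             close = i
--             break
--     if close is None:
--         return ''
--     rest = lines[close + 1:]
--     while rest and rest[0].strip() == '':
--         rest = rest[1:]
--     return '\n'.join(rest)
-- ===== Notes on version B (the rewrite author's own statement) =====
-- stated objective: simpler
-- what changed: Replaced A's enumerate/in_frontmatter state-machine loop with a direct search for the index of the closing fence line, a slice of the remaining lines, and a small loop dropping leading blank lines; the trailing newline-lstrip becomes unnecessary.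
import Mathlib
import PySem

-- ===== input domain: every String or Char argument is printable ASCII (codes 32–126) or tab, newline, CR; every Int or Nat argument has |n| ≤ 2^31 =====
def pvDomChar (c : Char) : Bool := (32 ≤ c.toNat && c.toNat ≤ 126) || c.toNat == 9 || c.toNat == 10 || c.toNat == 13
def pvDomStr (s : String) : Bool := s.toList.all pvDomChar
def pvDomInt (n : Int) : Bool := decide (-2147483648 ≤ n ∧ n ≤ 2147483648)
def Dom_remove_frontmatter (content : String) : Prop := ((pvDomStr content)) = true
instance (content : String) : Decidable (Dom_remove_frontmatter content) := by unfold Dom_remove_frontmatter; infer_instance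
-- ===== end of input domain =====

-- B replaces A's in_frontmatter state machine by a direct search for the closing fence,
-- a slice, and a drop of leading blank lines (objective: simpler; same linear cost).

-- ===== PORT A =====
-- hand port of Python's s.lstrip('\n') (PySem has no lstrip-with-chars primitive);
-- exact: drops exactly the leading '\n' characters of s
def pvLstripNL (s : String) : String := String.ofList (s.toList.dropWhile (· == '\n'))

def remove_frontmatter (content : String) : String :=
  let lines := (PySem.Str.split? content "\n").getD []
  if !lines.isEmpty && (PySem.Str.strip (lines.headD "") == "---") then
    let st := (PySem.List.enumerate lines).foldl
      (fun (st : List String × Bool) p =>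
        if p.1 == 0 then st
        else if st.2 then
          if PySem.Str.strip p.2 == "---" then (st.1, false) else st
        else
          if !st.1.isEmpty || PySem.Str.strip p.2 != "" then (st.1 ++ [p.2], st.2) else st)
      (([] : List String), true)
    pvLstripNL (PySem.Str.join "\n" st.1)
  else content

-- ===== PORT B =====
def pvFindClose : List String → Nat → Option Nat
  | [], _ => none
  | l :: rest, i => if PySem.Str.strip l == "---" then some i else pvFindClose rest (i + 1)

def pvDropBlank : List String → List String
  | [] => []
  | l :: rest => if PySem.Str.strip l == "" then pvDropBlank rest else l :: rest

def remove_frontmatter_alt (content : String) : String :=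
  let lines := (PySem.Str.split? content "\n").getD []
  if PySem.Str.strip (lines.headD "") == "---" then
    match pvFindClose (lines.drop 1) 1 with
    | none => ""
    | some close => PySem.Str.join "\n" (pvDropBlank (lines.drop (close + 1)))
  else content

-- ===== PRECONDITION & SPEC =====
def Spec_remove_frontmatter (content : String) (out : String) : Prop := out = remove_frontmatter_alt content
instance (content : String) (out : String) : Decidable (Spec_remove_frontmatter content out) := by unfold Spec_remove_frontmatter; infer_instance

-- ===== CLAIM (what is proved, stated in full; the proofs are below) =====
def Claim_equal_remove_frontmatter : Prop := ∀ (content : String), Dom_remove_frontmatter content → Spec_remove_frontmatter content (remove_frontmatter content)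

-- ===== LEMMAS AND PROOFS =====

-- A's loop body without the enumerate index (the index is only used to skip i = 0)
def pvStepA (st : List String × Bool) (line : String) : List String × Bool :=
  if st.2 then
    if PySem.Str.strip line == "---" then (st.1, false) else st
  else
    if !st.1.isEmpty || PySem.Str.strip line != "" then (st.1 ++ [line], st.2) else st

lemma pvEnumFold (ts : List String) : ∀ (k : Int), 1 ≤ k → ∀ (st : List String × Bool),
    (PySem.List.enumerate ts k).foldl
      (fun (st : List String × Bool) p =>
        if p.1 == 0 then st
        else if st.2 then
          if PySem.Str.strip p.2 == "---" then (st.1, false) else st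
        else
          if !st.1.isEmpty || PySem.Str.strip p.2 != "" then (st.1 ++ [p.2], st.2) else st)
      st = ts.foldl pvStepA st := by
  induction ts with
  | nil => intro k hk st; simp [PySem.List.enumerate]
  | cons h t ih =>
    intro k hk st
    have hk0 : (k == 0) = false := by simp; omega
    simp only [PySem.List.enumerate, List.foldl_cons, hk0]
    rw [ih (k+1) (by omega)]
    rfl

lemma pvFoldNonempty (vs : List String) : ∀ (a : String) (acc : List String),
    vs.foldl pvStepA (a :: acc, false) = ((a :: acc) ++ vs, false) := by
  induction vs with
  | nil => simp
  | cons v t ih =>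
    intro a acc
    simp only [List.foldl_cons, pvStepA, List.isEmpty_cons]
    simp only [Bool.false_eq_true, if_false, Bool.not_false, Bool.true_or, if_true]
    rw [show (a :: acc) ++ [v] = a :: (acc ++ [v]) by simp]
    rw [ih a (acc ++ [v])]
    simp

lemma pvFoldNil (vs : List String) : vs.foldl pvStepA ([], false) = (pvDropBlank vs, false) := by
  induction vs with
  | nil => simp [pvDropBlank]
  | cons v t ih =>
    simp only [List.foldl_cons, pvStepA, pvDropBlank]
    by_cases hb : PySem.Str.strip v = ""
    · simp [hb, ih]
    · simp [hb, pvFoldNonempty]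

lemma pvFindClose_shift (ts : List String) : ∀ (i : Nat),
    pvFindClose ts i = (pvFindClose ts 0).map (· + i) := by
  induction ts with
  | nil => intro i; simp [pvFindClose]
  | cons h t ih =>
    intro i
    by_cases hf : PySem.Str.strip h = "---"
    · simp [pvFindClose, hf]
    · simp only [pvFindClose]
      rw [ih (i+1), ih 1]
      cases pvFindClose t 0 with
      | none => simp
      | some c => simp [hf, Nat.add_comm, Nat.add_left_comm]

lemma pvLoopA (ts : List String) :
    ts.foldl pvStepA ([], true) =
      match pvFindClose ts 0 with
      | none => ([], true)
      | some c => (pvDropBlank (ts.drop (c + 1)), false) := by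
  induction ts with
  | nil => simp [pvFindClose]
  | cons h t ih =>
    by_cases hf : PySem.Str.strip h = "---"
    · simp only [List.foldl_cons, pvStepA, hf, pvFindClose]
      simp [pvFoldNil]
    · simp only [List.foldl_cons, pvStepA, pvFindClose]
      simp only [if_true, beq_iff_eq, hf, if_false]
      rw [pvFindClose_shift t 1]
      rw [ih]
      cases hc : pvFindClose t 0 with
      | none => simp
      | some c => simp [List.drop_succ_cons]

lemma pvGoNoNL : ∀ (fuel : Nat) (l cur : List Char) (acc : List (List Char)),
    l.length < fuel → '\n' ∉ cur → (∀ p ∈ acc, '\n' ∉ p) →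
    ∀ p ∈ PySem.Chars.splitOn.go ['\n'] fuel l cur acc, '\n' ∉ p := by
  intro fuel
  induction fuel with
  | zero => intro l cur acc h; omega
  | succ f ih =>
    intro l cur acc hlen hcur hacc p hp
    cases l with
    | nil =>
      simp only [PySem.Chars.splitOn.go] at hp
      simp only [List.mem_reverse, List.mem_cons] at hp
      rcases hp with h | h
      · subst h; simpa using hcur
      · exact hacc p h
    | cons c rest =>
      by_cases hpre : List.isPrefixOf ['\n'] (c :: rest) = true
      · simp only [PySem.Chars.splitOn.go, hpre, if_true] at hp
        refine ih _ _ _ (by simpa using Nat.lt_of_succ_lt_succ (by simpa using hlen)) (by simp) ?_ p hp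
        intro q hq
        rcases List.mem_cons.mp hq with h | h
        · subst h; simpa using hcur
        · exact hacc q h
      · simp only [PySem.Chars.splitOn.go, hpre] at hp
        have hc : c ≠ '\n' := by
          intro h; subst h
          simp [List.isPrefixOf] at hpre
        refine ih rest (c :: cur) acc (by simpa using hlen) ?_ hacc p hp
        intro h
        rcases List.mem_cons.mp h with h | h
        · exact hc h.symm
        · exact hcur h

lemma pvSplitNoNL (cs : List Char) : ∀ p ∈ PySem.Chars.splitOn cs ['\n'], '\n' ∉ p := by
  intro p hp
  exact pvGoNoNL (cs.length + 1) cs [] [] (by omega) (by simp) (by simp) p hp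

lemma pvSplitSome (content : String) :
    PySem.Str.split? content "\n" = some (((PySem.Chars.splitOn content.toList ['\n'])).map String.ofList) := by
  simp [PySem.Str.split?, PySem.Chars.split?]

lemma pvLinesNoNL (content : String) :
    ∀ l ∈ (PySem.Str.split? content "\n").getD [], '\n' ∉ l.toList := by
  intro l hl
  rw [pvSplitSome] at hl
  simp only [Option.getD_some, List.mem_map] at hl
  obtain ⟨p, hp, rfl⟩ := hl
  simpa using pvSplitNoNL content.toList p hp

lemma pvDropBlank_head (vs : List String) : ∀ l, (pvDropBlank vs).head? = some l →
    PySem.Str.strip l ≠ "" := by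
  induction vs with
  | nil => intro l h; simp [pvDropBlank] at h
  | cons v t ih =>
    intro l h
    by_cases hb : PySem.Str.strip v = ""
    · exact ih l (by simpa [pvDropBlank, hb] using h)
    · simp [pvDropBlank, hb] at h
      subst h; exact hb

lemma pvDropBlank_subset (vs : List String) : ∀ l ∈ pvDropBlank vs, l ∈ vs := by
  induction vs with
  | nil => simp [pvDropBlank]
  | cons v t ih =>
    intro l hl
    by_cases hb : PySem.Str.strip v = ""
    · simp [pvDropBlank, hb] at hl
      exact List.mem_cons_of_mem v (ih l hl)
    · simp [pvDropBlank, hb] at hl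
      simpa using hl

lemma pvStripNeNil {l : String} (h : PySem.Str.strip l ≠ "") : l.toList ≠ [] := by
  intro hnil
  apply h
  rw [String.toList_eq_nil_iff.mp hnil]
  rfl

lemma pvJoinCons (x : List Char) (ps : List (List Char)) :
    ∃ r, PySem.Chars.join ['\n'] (x :: ps) = x ++ r := by
  cases ps with
  | nil => exact ⟨[], by rw [PySem.Chars.join_singleton]; simp⟩
  | cons y q => exact ⟨'\n' :: PySem.Chars.join ['\n'] (y :: q), by
      rw [PySem.Chars.join_cons_cons]; simp⟩

lemma pvLstripJoin (xs : List String) (hnl : ∀ l ∈ xs, '\n' ∉ l.toList)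
    (hh : ∀ l, xs.head? = some l → PySem.Str.strip l ≠ "") :
    pvLstripNL (PySem.Str.join "\n" xs) = PySem.Str.join "\n" xs := by
  cases xs with
  | nil => rfl
  | cons h t =>
    have hne : h.toList ≠ [] := pvStripNeNil (hh h rfl)
    obtain ⟨r, hr⟩ := pvJoinCons h.toList (t.map String.toList)
    have hjoin : (PySem.Str.join "\n" (h :: t)).toList = h.toList ++ r := by
      rw [PySem.Str.toList_join]
      simpa using hr
    cases hc : h.toList with
    | nil => exact absurd hc hne
    | cons c cs =>
      have hcnl : (c == '\n') = false := by
        have := hnl h (by simp)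
        rw [hc] at this
        simp only [List.mem_cons, not_or] at this
        simpa using fun e => this.1 e.symm
      unfold pvLstripNL
      rw [hjoin, hc]
      simp only [List.cons_append, List.dropWhile_cons, hcnl, Bool.false_eq_true, if_false]
      have h2 : c :: (cs ++ r) = (PySem.Str.join "\n" (h :: t)).toList := by
        rw [hjoin, hc]; simp
      rw [h2]
      simp [PySem.Str.join]

lemma pvEnumFold0 (l0 : String) (ts : List String) :
    (PySem.List.enumerate (l0 :: ts)).foldl
      (fun (st : List String × Bool) p =>
        if p.1 == 0 then st
        else if st.2 then
          if PySem.Str.strip p.2 == "---" then (st.1, false) else st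
        else
          if !st.1.isEmpty || PySem.Str.strip p.2 != "" then (st.1 ++ [p.2], st.2) else st)
      (([] : List String), true) = ts.foldl pvStepA ([], true) := by
  have h : PySem.List.enumerate (l0 :: ts) = ((0 : Int), l0) :: PySem.List.enumerate ts 1 := by
    simp [PySem.List.enumerate]
  rw [h, List.foldl_cons]
  exact pvEnumFold ts 1 (by omega) ([], true)

-- ===== VERDICT (by name: the statement is the Claim_ definition above) =====
theorem remove_frontmatter_spec : Claim_equal_remove_frontmatter := by
  intro content _
  unfold Spec_remove_frontmatter remove_frontmatter remove_frontmatter_alt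
  have hnl := pvLinesNoNL content
  cases hl : (PySem.Str.split? content "\n").getD [] with
  | nil =>
    simp only [List.isEmpty_nil, Bool.not_true, Bool.false_and, List.headD_nil]
    simp [show (PySem.Str.strip "" == "---") = false from by decide]
  | cons l0 ts =>
    rw [hl] at hnl
    by_cases hf : PySem.Str.strip l0 = "---"
    · simp only [List.isEmpty_cons, Bool.not_false, List.headD_cons, hf, beq_self_eq_true,
        Bool.and_self, if_true, List.drop_succ_cons, List.drop_zero]
      rw [pvEnumFold0, pvLoopA ts, pvFindClose_shift ts 1]
      cases hc : pvFindClose ts 0 with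
      | none => simp [pvLstripNL, PySem.Str.join, PySem.Chars.join, List.intercalate]
      | some c =>
        simp only [Option.map_some]
        apply pvLstripJoin
        · intro l hlmem
          exact hnl l (List.mem_cons_of_mem l0
            (List.mem_of_mem_drop (pvDropBlank_subset _ l hlmem)))
        · exact pvDropBlank_head _
    · simp [hf]
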